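-- pv_equiv track=rewrite | github.com/wxin9/cc-skill-product-lifecycle-orchestrator | scripts/core/lifecycle_specs.py | _walk_impacted_nodes
-- ===== SOURCE A (Python) =====
-- from typing import Any, Dict, Iterable, List, Optional, Tuple
--
-- def _walk_impacted_nodes(changed_nodes: List[str], edges: List[Dict[str, Any]]) -> set:
--     adjacency: Dict[str, set] = {}
--     for edge in edges:
--         src = edge.get("from")
--         dst = edge.get("to")
--         if not src or not dst:
--             continue
--         adjacency.setdefault(src, set()).add(dst)
--         adjacency.setdefault(dst, set()).add(src)
--
--     impacted = set(changed_nodes)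
--     frontier = list(changed_nodes)
--     while frontier:
--         current = frontier.pop(0)
--         for nxt in adjacency.get(current, set()):
--             if nxt not in impacted:
--                 impacted.add(nxt)
--                 frontier.append(nxt)
--     return impacted
-- ===== SOURCE B (Python) =====
-- def _walk_impacted_nodes(changed_nodes, edges):
--     # One growing worklist doubles as result and queue; edges are rescanned
--     # per node instead of building an adjacency index.
--     order = list(dict.fromkeys(changed_nodes))
--     i = 0
--     while i < len(order):
--         cur = order[i]
--         for edge in edges:
--             src = edge.get("from")
--             dst = edge.get("to")
--             if not src or not dst:
--                 continue
--             if src == cur and dst not in order: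
--                 order.append(dst)
--             if dst == cur and src not in order:
--                 order.append(src)
--         i += 1
--     return set(order)
-- ===== Notes on version B (the rewrite author's own statement) =====
-- stated objective: simpler
-- what changed: Replaces the adjacency-dict-of-sets plus separate frontier queue with a single growing deduplicated worklist that serves both as the result set and the BFS queue, rescanning the edge list for each processed node.
import Mathlib
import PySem

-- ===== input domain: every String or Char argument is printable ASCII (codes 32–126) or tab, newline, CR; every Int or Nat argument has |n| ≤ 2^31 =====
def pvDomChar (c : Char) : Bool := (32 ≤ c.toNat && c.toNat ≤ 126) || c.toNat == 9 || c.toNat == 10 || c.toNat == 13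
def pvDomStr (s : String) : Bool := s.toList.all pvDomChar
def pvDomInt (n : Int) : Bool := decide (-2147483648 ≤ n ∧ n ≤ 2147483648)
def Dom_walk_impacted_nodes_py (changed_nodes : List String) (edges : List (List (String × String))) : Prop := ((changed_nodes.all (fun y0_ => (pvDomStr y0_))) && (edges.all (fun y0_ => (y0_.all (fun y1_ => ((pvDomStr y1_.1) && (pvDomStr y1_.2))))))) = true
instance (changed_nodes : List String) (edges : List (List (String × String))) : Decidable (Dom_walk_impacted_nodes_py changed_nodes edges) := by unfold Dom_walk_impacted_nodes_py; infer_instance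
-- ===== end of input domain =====

-- B replaces A's adjacency-dict-of-sets + frontier queue by a single growing deduplicated
-- worklist (result and queue at once) that rescans the edge list per processed node
-- (objective: simpler; not faster).
-- Both loops run on a fuel argument that provably never runs out (a bound from the input
-- sizes); it only makes the recursion structural.

-- ===== PORT A =====

-- shared decoding of one edge dict: src = edge.get("from"); dst = edge.get("to");
-- 'if not src or not dst: continue'  (first-match lookup on the association list)
def pvEdgeSD (e : List (String × String)) : Option (String × String) :=
  match (e.find? (fun p => p.1 == "from")).map (·.2), (e.find? (fun p => p.1 == "to")).map (·.2) with
  | some s, some d => if s = "" ∨ d = "" then none else some (s, d)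
  | _, _ => none

-- the inner 'for nxt in adjacency.get(current, set())' loop of A
def pvInnerA (imp fr : List String) (cs : List String) : List String × List String :=
  cs.foldl (fun st nxt => if nxt ∈ st.1 then st else (PySem.Set.add st.1 nxt, st.2 ++ [nxt])) (imp, fr)

-- A's adjacency-building loop:
-- adjacency.setdefault(src, set()).add(dst); adjacency.setdefault(dst, set()).add(src)
def pvAdjStep (adj : PySem.Dict String (PySem.Set String)) (e : List (String × String)) :
    PySem.Dict String (PySem.Set String) :=
  match pvEdgeSD e with
  | none => adj
  | some (s, d) =>
    (adj.modify s PySem.Set.empty (fun st => PySem.Set.add st d)).modify d PySem.Set.empty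
      (fun st => PySem.Set.add st s)

def pvBuildAdj (edges : List (List (String × String))) : PySem.Dict String (PySem.Set String) :=
  edges.foldl pvAdjStep PySem.Dict.empty

def pvEnds (e : List (String × String)) : List String :=
  match pvEdgeSD e with
  | none => []
  | some (s, d) => [s, d]

def pvUniverse (changed_nodes : List String) (edges : List (List (String × String))) : List String :=
  changed_nodes ++ edges.flatMap pvEnds

-- A's BFS 'while frontier' loop (fuel is a bound on the remaining iterations)
def walk_impacted_nodes_py_loop (adj : PySem.Dict String (PySem.Set String))
    (fuel : Nat) (imp fr : List String) : List String :=
  match fuel with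
  | 0 => imp
  | fuel + 1 =>
    match fr with
    | [] => imp
    | cur :: rest =>
      walk_impacted_nodes_py_loop adj fuel
        (pvInnerA imp rest (adj.getD cur PySem.Set.empty)).1
        (pvInnerA imp rest (adj.getD cur PySem.Set.empty)).2

def walk_impacted_nodes_py (changed_nodes : List String) (edges : List (List (String × String))) : List String :=
  walk_impacted_nodes_py_loop (pvBuildAdj edges)
    (2 * (pvUniverse changed_nodes edges).length + changed_nodes.length + 1)
    (PySem.Set.ofList changed_nodes) changed_nodes

-- ===== PORT B =====

-- B's inner 'for edge in edges' scan appending unseen neighbours of cur to the worklist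
def pvInnerB (edges : List (List (String × String))) (cur : String) (order : List String) : List String :=
  edges.foldl (fun acc e =>
    match pvEdgeSD e with
    | none => acc
    | some (s, d) =>
      let acc1 := if s = cur ∧ d ∉ acc then acc ++ [d] else acc
      if d = cur ∧ s ∉ acc1 then acc1 ++ [s] else acc1) order

-- B's 'while i < len(order)' loop (same kind of fuel bound)
def walk_impacted_nodes_py_alt_loop (edges : List (List (String × String)))
    (fuel : Nat) (order : List String) (i : Nat) : List String :=
  match fuel with
  | 0 => order
  | fuel + 1 =>
    if h : i < order.length then
      walk_impacted_nodes_py_alt_loop edges fuel (pvInnerB edges order[i] order) (i + 1)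
    else order

def walk_impacted_nodes_py_alt (changed_nodes : List String) (edges : List (List (String × String))) : List String :=
  PySem.Set.ofList (walk_impacted_nodes_py_alt_loop edges
    (2 * (pvUniverse changed_nodes edges).length + changed_nodes.length + 1)
    (PySem.List.dedup changed_nodes) 0)

-- ===== PRECONDITION & SPEC =====
def Spec_walk_impacted_nodes_py (changed_nodes : List String) (edges : List (List (String × String))) (out : List String) : Prop := out = walk_impacted_nodes_py_alt changed_nodes edges
instance (changed_nodes : List String) (edges : List (List (String × String))) (out : List String) : Decidable (Spec_walk_impacted_nodes_py changed_nodes edges out) := by unfold Spec_walk_impacted_nodes_py; infer_instance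

-- ===== CLAIM (what is proved, stated in full; the proofs are below) =====
def Claim_equal_walk_impacted_nodes_py : Prop := ∀ (changed_nodes : List String) (edges : List (List (String × String))), Dom_walk_impacted_nodes_py changed_nodes edges → Spec_walk_impacted_nodes_py changed_nodes edges (walk_impacted_nodes_py changed_nodes edges)

-- ===== LEMMAS AND PROOFS =====

def pvNews (seen cs : List String) : List String :=
  match cs with
  | [] => []
  | c :: cs => if c ∈ seen then pvNews seen cs else c :: pvNews (seen ++ [c]) cs

theorem mem_pvNews {x : String} : ∀ {cs seen : List String}, x ∈ pvNews seen cs ↔ x ∈ cs ∧ x ∉ seen := by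
  intro cs
  induction cs with
  | nil => intro seen; simp [pvNews]
  | cons c cs ih =>
    intro seen
    by_cases h : c ∈ seen
    · simp only [pvNews, if_pos h, ih, List.mem_cons]
      constructor
      · rintro ⟨hx, hn⟩; exact ⟨Or.inr hx, hn⟩
      · rintro ⟨hx | hx, hn⟩
        · exact absurd (hx ▸ h) hn
        · exact ⟨hx, hn⟩
    · simp only [pvNews, if_neg h, List.mem_cons, ih, List.mem_append, List.mem_singleton]
      constructor
      · rintro (rfl | ⟨hx, hn⟩)
        · exact ⟨Or.inl rfl, h⟩
        · exact ⟨Or.inr hx, fun hs => hn (Or.inl hs)⟩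
      · rintro ⟨rfl | hx, hn⟩
        · exact Or.inl rfl
        · by_cases e : x = c
          · exact Or.inl e
          · exact Or.inr ⟨hx, by simp [hn, e]⟩

theorem pvNews_nodup : ∀ (cs seen : List String), (pvNews seen cs).Nodup := by
  intro cs
  induction cs with
  | nil => intro seen; simp [pvNews]
  | cons c cs ih =>
    intro seen
    by_cases h : c ∈ seen
    · simpa [pvNews, h] using ih seen
    · simp only [pvNews, if_neg h, List.nodup_cons]
      refine ⟨fun hc => ?_, ih _⟩
      exact (mem_pvNews.1 hc).2 (by simp)

theorem pvNews_eq_nil {seen cs : List String} (h : ∀ c ∈ cs, c ∈ seen) : pvNews seen cs = [] := by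
  induction cs with
  | nil => rfl
  | cons c cs ih =>
    have hc : c ∈ seen := h c (by simp)
    simp only [pvNews, if_pos hc]
    exact ih (fun x hx => h x (by simp [hx]))

theorem pvNews_append : ∀ (xs ys seen : List String),
    pvNews seen (xs ++ ys) = pvNews seen xs ++ pvNews (seen ++ pvNews seen xs) ys := by
  intro xs
  induction xs with
  | nil => intro ys seen; simp [pvNews]
  | cons c xs ih =>
    intro ys seen
    by_cases h : c ∈ seen
    · simp [pvNews, h, ih]
    · simp [pvNews, h, ih, List.append_assoc]

theorem pvNews_congr : ∀ {cs s t : List String}, (∀ x ∈ cs, x ∈ s ↔ x ∈ t) → pvNews s cs = pvNews t cs := by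
  intro cs
  induction cs with
  | nil => intro s t _; rfl
  | cons c cs ih =>
    intro s t h
    have hc := h c (by simp)
    by_cases hs : c ∈ s
    · simp only [pvNews, if_pos hs, if_pos (hc.1 hs)]
      exact ih (fun x hx => h x (by simp [hx]))
    · have ht : c ∉ t := fun htt => hs (hc.2 htt)
      simp only [pvNews, if_neg hs, if_neg ht]
      refine congrArg _ (ih fun x hx => ?_)
      simp only [List.mem_append, List.mem_singleton]
      have := h x (by simp [hx])
      tauto

theorem pvNews_filter : ∀ {cs s : List String} (p : String → Bool),
    (∀ x ∈ cs, p x = false → x ∈ s) → pvNews s (cs.filter p) = pvNews s cs := by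
  intro cs
  induction cs with
  | nil => intro s p _; rfl
  | cons c cs ih =>
    intro s p h
    cases hp : p c with
    | false =>
      have hc : c ∈ s := h c (by simp) hp
      rw [show (c :: cs).filter p = cs.filter p from by simp [hp]]
      rw [show pvNews s (c :: cs) = pvNews s cs from by simp [pvNews, hc]]
      exact ih p (fun x hx => h x (by simp [hx]))
    | true =>
      rw [show (c :: cs).filter p = c :: cs.filter p from by simp [hp]]
      by_cases hs : c ∈ s
      · simp only [pvNews, if_pos hs]
        exact ih p (fun x hx => h x (by simp [hx]))
      · simp only [pvNews, if_neg hs]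
        refine congrArg _ (ih p fun x hx hpx => ?_)
        exact List.mem_append_left _ (h x (by simp [hx]) hpx)

theorem pvNews_of_disjoint : ∀ {cs s : List String}, cs.Nodup → (∀ x ∈ cs, x ∉ s) → pvNews s cs = cs := by
  intro cs
  induction cs with
  | nil => intro s _ _; rfl
  | cons c cs ih =>
    intro s hn h
    have hc : c ∉ s := h c (by simp)
    simp only [pvNews, if_neg hc]
    refine congrArg _ (ih hn.of_cons fun x hx => ?_)
    simp only [List.mem_append, List.mem_singleton]
    rintro (hxs | rfl)
    · exact h x (by simp [hx]) hxs
    · exact (List.nodup_cons.1 hn).1 hx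

theorem pvNews_pvNews : ∀ {cs s imp : List String}, (∀ x ∈ s, x ∈ imp) →
    pvNews imp (pvNews s cs) = pvNews imp cs := by
  intro cs
  induction cs with
  | nil => intro s imp _; rfl
  | cons c cs ih =>
    intro s imp h
    by_cases hs : c ∈ s
    · simp only [pvNews, if_pos hs, if_pos (h c hs)]
      exact ih h
    · simp only [pvNews, if_neg hs]
      by_cases hi : c ∈ imp
      · simp only [pvNews, if_pos hi]
        refine (ih (s := s ++ [c]) ?_)
        intro x hx
        rcases List.mem_append.1 hx with hx | hx
        · exact h x hx
        · simpa using (List.mem_singleton.1 hx) ▸ hi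
      · simp only [pvNews, if_neg hi]
        refine congrArg _ (ih (s := s ++ [c]) ?_)
        intro x hx
        rcases List.mem_append.1 hx with hx | hx
        · exact List.mem_append_left _ (h x hx)
        · exact List.mem_append_right _ hx

theorem pvSetAdd (s : List String) (x : String) :
    PySem.Set.add s x = if x ∈ s then s else s ++ [x] := by
  by_cases h : x ∈ s <;> simp [PySem.Set.add, PySem.Set.contains, h]

theorem pvFoldAdd_eq : ∀ (cs s : List String), cs.foldl PySem.Set.add s = s ++ pvNews s cs := by
  intro cs
  induction cs with
  | nil => intro s; simp [pvNews]
  | cons c cs ih =>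
    intro s
    rw [List.foldl_cons, pvSetAdd]
    by_cases h : c ∈ s
    · simp only [if_pos h, ih, pvNews, if_pos h]
    · simp only [if_neg h, ih, pvNews, if_neg h]
      simp [List.append_assoc]

theorem pvOfList_eq_pvNews (xs : List String) : PySem.Set.ofList xs = pvNews [] xs := by
  rw [PySem.Set.ofList_eq_foldl, pvFoldAdd_eq]; rfl

-- candidate neighbours of `cur` contributed by one edge, then by the whole edge list
def pvCands (cur : String) (e : List (String × String)) : List String :=
  match pvEdgeSD e with
  | none => []
  | some (s, d) => (if s = cur then [d] else []) ++ (if d = cur then [s] else [])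

def pvScan (edges : List (List (String × String))) (cur : String) : List String :=
  edges.flatMap (pvCands cur)

theorem pvScan_subset (edges : List (List (String × String))) (cur : String) :
    ∀ x ∈ pvScan edges cur, x ∈ edges.flatMap pvEnds := by
  intro x hx
  rcases List.mem_flatMap.1 hx with ⟨e, he, hx⟩
  refine List.mem_flatMap.2 ⟨e, he, ?_⟩
  unfold pvCands at hx
  unfold pvEnds
  cases hE : pvEdgeSD e with
  | none => rw [hE] at hx; simp at hx
  | some sd =>
    obtain ⟨s, d⟩ := sd
    rw [hE] at hx
    simp only [List.mem_cons, List.mem_singleton]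
    rcases List.mem_append.1 hx with hx | hx <;> split_ifs at hx <;> simp_all

theorem pvLen_le {l U : List String} (h1 : l.Nodup) (h2 : ∀ x ∈ l, x ∈ U) : l.length ≤ U.length :=
  (h1.subperm h2).length_le



theorem pvNew_nodup {imp cs : List String} (h1 : imp.Nodup) : (imp ++ pvNews imp cs).Nodup := by
  refine h1.append (pvNews_nodup cs imp) ?_
  intro a ha hb
  exact (mem_pvNews.1 hb).2 ha

theorem pvNew_sub {imp cs U : List String} (h2 : ∀ x ∈ imp, x ∈ U) (hcs : ∀ x ∈ cs, x ∈ U) :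
    ∀ x ∈ imp ++ pvNews imp cs, x ∈ U := by
  intro x hx
  rcases List.mem_append.1 hx with hx | hx
  · exact h2 x hx
  · exact hcs x (mem_pvNews.1 hx).1

theorem pvInnerA_eq : ∀ (cs imp fr : List String),
    pvInnerA imp fr cs = (imp ++ pvNews imp cs, fr ++ pvNews imp cs) := by
  intro cs
  induction cs with
  | nil => intro imp fr; simp [pvInnerA, pvNews]
  | cons c cs ih =>
    intro imp fr
    simp only [pvInnerA, List.foldl_cons]
    by_cases h : c ∈ imp
    · have : (if c ∈ (imp, fr).1 then (imp, fr) else (PySem.Set.add (imp, fr).1 c, (imp, fr).2 ++ [c])) = (imp, fr) := by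
        simp [h]
      rw [this]
      have := ih imp fr
      simp only [pvInnerA] at this
      rw [this]
      simp [pvNews, h]
    · have : (if c ∈ (imp, fr).1 then (imp, fr) else (PySem.Set.add (imp, fr).1 c, (imp, fr).2 ++ [c])) = (imp ++ [c], fr ++ [c]) := by
        simp [h, pvSetAdd]
      rw [this]
      have := ih (imp ++ [c]) (fr ++ [c])
      simp only [pvInnerA] at this
      rw [this]
      simp [pvNews, h, List.append_assoc]

theorem pvAdjStep_getD (adj : PySem.Dict String (PySem.Set String)) (e : List (String × String)) (c : String) :
    (pvAdjStep adj e).getD c PySem.Set.empty = (pvCands c e).foldl PySem.Set.add (adj.getD c PySem.Set.empty) := by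
  unfold pvAdjStep pvCands
  cases hE : pvEdgeSD e with
  | none => rfl
  | some sd =>
    obtain ⟨s, d⟩ := sd
    by_cases hs : s = c <;> by_cases hd : d = c
    · subst hs; subst hd; simp [PySem.Dict.getD_modify]
    · subst hs
      have hcd : ¬ s = d := fun h => hd h.symm
      simp [PySem.Dict.getD_modify, hcd, hd]
    · subst hd
      have hcs : ¬ d = s := fun h => hs h.symm
      simp [PySem.Dict.getD_modify, hcs, hs]
    · have hcd : ¬ c = d := fun h => hd h.symm
      have hcs : ¬ c = s := fun h => hs h.symm
      simp [PySem.Dict.getD_modify, hcd, hcs, hs, hd]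

theorem pvBuildAdj_getD_gen : ∀ (edges : List (List (String × String)))
    (d0 : PySem.Dict String (PySem.Set String)) (c : String),
    (edges.foldl pvAdjStep d0).getD c PySem.Set.empty
      = (pvScan edges c).foldl PySem.Set.add (d0.getD c PySem.Set.empty) := by
  intro edges
  induction edges with
  | nil => intro d0 c; rfl
  | cons e es ih =>
    intro d0 c
    rw [List.foldl_cons, ih, pvAdjStep_getD]
    simp only [pvScan, List.flatMap_cons, List.foldl_append]

theorem pvBuildAdj_getD (edges : List (List (String × String))) (c : String) :
    ((pvBuildAdj edges).getD c PySem.Set.empty : List String) = PySem.Set.ofList (pvScan edges c) := by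
  rw [pvBuildAdj, pvBuildAdj_getD_gen, PySem.Set.ofList_eq_foldl]
  rfl

theorem pvInnerB_step (e : List (String × String)) (cur : String) (acc : List String) :
    (match pvEdgeSD e with
      | none => acc
      | some (s, d) =>
        let acc1 := if s = cur ∧ d ∉ acc then acc ++ [d] else acc
        if d = cur ∧ s ∉ acc1 then acc1 ++ [s] else acc1)
      = acc ++ pvNews acc (pvCands cur e) := by
  unfold pvCands
  cases hE : pvEdgeSD e with
  | none => simp [pvNews]
  | some sd =>
    obtain ⟨s, d⟩ := sd
    by_cases hs : s = cur <;> by_cases hd : d = cur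
    · subst hs; subst hd
      by_cases h1 : d ∈ acc <;> simp [pvNews, h1, List.append_assoc]
    · subst hs
      by_cases h1 : d ∈ acc <;> simp [pvNews, h1, hd, List.append_assoc]
    · subst hd
      by_cases h2 : s ∈ acc <;> simp [pvNews, hs, h2, List.append_assoc]
    · simp [pvNews, hs, hd]

theorem pvInnerB_eq : ∀ (edges : List (List (String × String))) (cur : String) (order : List String),
    pvInnerB edges cur order = order ++ pvNews order (pvScan edges cur) := by
  intro edges
  induction edges with
  | nil => intro cur order; simp [pvInnerB, pvScan, pvNews]
  | cons e es ih =>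
    intro cur order
    simp only [pvInnerB, List.foldl_cons]
    rw [show (match pvEdgeSD e with
      | none => order
      | some (s, d) =>
        let acc1 := if s = cur ∧ d ∉ order then order ++ [d] else order
        if d = cur ∧ s ∉ acc1 then acc1 ++ [s] else acc1)
      = order ++ pvNews order (pvCands cur e) from pvInnerB_step e cur order]
    have := ih cur (order ++ pvNews order (pvCands cur e))
    simp only [pvInnerB] at this
    rw [this]
    simp only [pvScan, List.flatMap_cons]
    rw [pvNews_append, List.append_assoc]

-- unfolding equations for the two fuel loops
theorem pvLoopA_zero {adj} (imp fr : List String) :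
    walk_impacted_nodes_py_loop adj 0 imp fr = imp := rfl

theorem pvLoopA_nil {adj} (fuel : Nat) (imp : List String) :
    walk_impacted_nodes_py_loop adj (fuel + 1) imp [] = imp := rfl

theorem pvLoopA_cons {adj} (fuel : Nat) (imp : List String) (cur : String) (rest : List String) :
    walk_impacted_nodes_py_loop adj (fuel + 1) imp (cur :: rest)
      = walk_impacted_nodes_py_loop adj fuel
          (pvInnerA imp rest (adj.getD cur PySem.Set.empty)).1
          (pvInnerA imp rest (adj.getD cur PySem.Set.empty)).2 := rfl

theorem pvLoopB_stop {edges} (fuel : Nat) (order : List String) (i : Nat) (h : ¬ i < order.length) :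
    walk_impacted_nodes_py_alt_loop edges (fuel + 1) order i = order := by
  rw [walk_impacted_nodes_py_alt_loop, dif_neg h]

theorem pvLoopB_step {edges} (fuel : Nat) (order : List String) (i : Nat) (h : i < order.length) :
    walk_impacted_nodes_py_alt_loop edges (fuel + 1) order i
      = walk_impacted_nodes_py_alt_loop edges fuel (pvInnerB edges order[i] order) (i + 1) := by
  rw [walk_impacted_nodes_py_alt_loop, dif_pos h]

theorem pvLoopB_done {edges} (fuel : Nat) (order : List String) (i : Nat) (h : order.length ≤ i) :
    walk_impacted_nodes_py_alt_loop edges fuel order i = order := by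
  cases fuel with
  | zero => rfl
  | succ fuel => exact pvLoopB_stop fuel order i (by omega)

theorem pvLoopB_nodup {edges} :
    ∀ (fuel : Nat) (order : List String) (i : Nat), order.Nodup →
    (walk_impacted_nodes_py_alt_loop edges fuel order i).Nodup := by
  intro fuel
  induction fuel with
  | zero => intro order i h1; exact h1
  | succ fuel ih =>
    intro order i h1
    by_cases h : i < order.length
    · rw [pvLoopB_step fuel order i h]
      exact ih _ _ (by rw [pvInnerB_eq]; exact pvNew_nodup h1)
    · rw [pvLoopB_stop fuel order i h]
      exact h1

-- the simulation: A's (impacted, frontier) BFS equals B's indexed worklist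
theorem pvMain (edges : List (List (String × String))) (U : List String)
    (adj : PySem.Dict String (PySem.Set String))
    (hS : ∀ c, ∀ x ∈ pvScan edges c, x ∈ U)
    (hadj : ∀ c, ((adj.getD c PySem.Set.empty : List String)) = PySem.Set.ofList (pvScan edges c)) :
    ∀ (fa fb : Nat) (imp fr : List String) (i : Nat),
    imp.Nodup → (∀ x ∈ imp, x ∈ U) →
    2 * (U.length - imp.length) + fr.length ≤ fa →
    2 * (U.length - imp.length) + (imp.length - i) ≤ fb →
    (∀ x ∈ fr, x ∈ imp) →
    (∀ x ∈ imp.take i, ∀ y ∈ pvScan edges x, y ∈ imp) →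
    imp.drop i = pvNews [] (fr.filter (fun x => decide (x ∉ imp.take i))) →
    walk_impacted_nodes_py_loop adj fa imp fr
      = walk_impacted_nodes_py_alt_loop edges fb imp i := by
  intro fa
  induction fa with
  | zero =>
    intro fb imp fr i h1 h2 hma hmb hfr hfin hdrop
    have hfr0 : fr = [] := List.length_eq_zero_iff.1 (by omega)
    subst hfr0
    have hnil : imp.drop i = [] := by simpa [pvNews] using hdrop
    rw [List.drop_eq_nil_iff] at hnil
    rw [pvLoopA_zero, pvLoopB_done fb imp i hnil]
  | succ fa ih =>
    intro fb imp fr i h1 h2 hma hmb hfr hfin hdrop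
    cases fr with
    | nil =>
      have hnil : imp.drop i = [] := by simpa [pvNews] using hdrop
      rw [List.drop_eq_nil_iff] at hnil
      rw [pvLoopA_nil, pvLoopB_done fb imp i hnil]
    | cons cur rest =>
      have hn : pvNews imp ((adj.getD cur PySem.Set.empty : List String))
          = pvNews imp (pvScan edges cur) := by
        rw [hadj, pvOfList_eq_pvNews, pvNews_pvNews (by simp)]
      by_cases hcur : cur ∈ imp.take i
      · -- cur already finished: A's step is a no-op, B does not move
        have hN0 : pvNews imp ((adj.getD cur PySem.Set.empty : List String)) = [] := by
          rw [hn]; exact pvNews_eq_nil (hfin cur hcur)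
        rw [pvLoopA_cons, pvInnerA_eq, hN0]
        simp only [List.append_nil]
        refine ih fb imp rest i h1 h2 (by simp only [List.length_cons] at hma; omega) hmb
          (fun x hx => hfr x (by simp [hx])) hfin ?_
        rw [hdrop]
        rw [show (cur :: rest).filter (fun x => decide (x ∉ imp.take i))
          = rest.filter (fun x => decide (x ∉ imp.take i)) from by simp [hcur]]
      · -- cur processed for the first time: both sides append the same new nodes
        have hdrop' : imp.drop i = cur :: pvNews [cur] (rest.filter (fun x => decide (x ∉ imp.take i))) := by
          rw [hdrop]
          rw [show (cur :: rest).filter (fun x => decide (x ∉ imp.take i))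
            = cur :: rest.filter (fun x => decide (x ∉ imp.take i)) from by simp [hcur]]
          simp [pvNews]
        have hi : i < imp.length := by
          by_contra hle
          rw [List.drop_eq_nil_iff.2 (by omega)] at hdrop'
          exact absurd hdrop'.symm (List.cons_ne_nil _ _)
        have hdg := List.drop_eq_getElem_cons hi
        rw [hdrop'] at hdg
        injection hdg with hget1' hget2'
        have hget1 : imp[i] = cur := hget1'.symm
        have hget2 : imp.drop (i + 1) = pvNews [cur] (rest.filter (fun x => decide (x ∉ imp.take i))) := hget2'.symm
        have hcurimp : cur ∈ imp := hget1 ▸ List.getElem_mem hi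
        set N := pvNews imp (pvScan edges cur) with hNdef
        have hNdis : ∀ x ∈ N, x ∉ imp := fun x hx => (mem_pvNews.1 hx).2
        have hNnd : N.Nodup := pvNews_nodup _ _
        have p1 : (imp ++ N).Nodup := pvNew_nodup h1
        have q1 : ∀ x ∈ imp ++ N, x ∈ U := pvNew_sub h2 (hS cur)
        have hk : (imp ++ N).length ≤ U.length := pvLen_le p1 q1
        simp only [List.length_append] at hk
        -- A's step
        rw [pvLoopA_cons, pvInnerA_eq, hn]
        -- B's step (fb must be positive)
        cases fb with
        | zero => omega
        | succ fb =>
          rw [pvLoopB_step fb imp i hi, pvInnerB_eq, hget1]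
          refine ih fb (imp ++ N) (rest ++ N) (i + 1) p1 q1 ?_ ?_ ?_ ?_ ?_
          · simp only [List.length_append, List.length_cons] at hma ⊢
            omega
          · simp only [List.length_append] at hmb ⊢
            omega
          · intro x hx
            rcases List.mem_append.1 hx with hx | hx
            · exact List.mem_append_left _ (hfr x (by simp [hx]))
            · exact List.mem_append_right _ hx
          · -- all of take (i+1) is finished
            intro x hx y hy
            rw [List.take_append_of_le_length (by omega), List.take_succ_eq_append_getElem hi, hget1] at hx
            rcases List.mem_append.1 hx with hx | hx
            · exact List.mem_append_left _ (hfin x hx y hy)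
            · rw [List.mem_singleton] at hx
              subst hx
              by_cases hyi : y ∈ imp
              · exact List.mem_append_left _ hyi
              · exact List.mem_append_right _ (mem_pvNews.2 ⟨hy, hyi⟩)
          · -- the drop/filter invariant at (i+1)
            have htake : (imp ++ N).take (i + 1) = imp.take i ++ [cur] := by
              rw [List.take_append_of_le_length (by omega), List.take_succ_eq_append_getElem hi, hget1]
            rw [List.drop_append_of_le_length (by omega), hget2, htake]
            have hfilterN : N.filter (fun x => decide (x ∉ imp.take i ++ [cur])) = N := by
              refine List.filter_eq_self.2 fun x hx => ?_
              have hxni : x ∉ imp := hNdis x hx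
              simp only [decide_eq_true_eq, List.mem_append, List.mem_singleton]
              rintro (hxt | rfl)
              · exact hxni (List.take_subset _ _ hxt)
              · exact hxni hcurimp
            have hfilterR : rest.filter (fun x => decide (x ∉ imp.take i ++ [cur]))
                = (rest.filter (fun x => decide (x ∉ imp.take i))).filter (fun x => decide (¬ x = cur)) := by
              rw [List.filter_filter]
              refine List.filter_congr fun x _ => ?_
              by_cases hx1 : x ∈ imp.take i <;> by_cases hx2 : x = cur <;> simp [hx1, hx2]
            rw [List.filter_append, hfilterN, hfilterR]
            set X := (rest.filter (fun x => decide (x ∉ imp.take i))).filter (fun x => decide (¬ x = cur)) with hXdef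
            have hXsub : ∀ x ∈ X, x ∈ imp := by
              intro x hx
              have : x ∈ rest := List.mem_of_mem_filter (List.mem_of_mem_filter hx)
              exact hfr x (by simp [this])
            rw [pvNews_append]
            have h1' : pvNews [] X = pvNews [cur] X := by
              refine pvNews_congr fun x hx => ?_
              have hxc : ¬ x = cur := by
                have := List.of_mem_filter hx
                simpa using this
              simp [hxc]
            have h2' : pvNews [cur] X = pvNews [cur] (rest.filter (fun x => decide (x ∉ imp.take i))) := by
              refine pvNews_filter _ fun x _ hpf => ?_
              simp only [decide_eq_false_iff_not, Decidable.not_not] at hpf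
              simp [hpf]
            have h3' : pvNews ([] ++ pvNews [] X) N = N := by
              refine pvNews_of_disjoint hNnd fun x hx hxX => ?_
              have : x ∈ X := by
                have := mem_pvNews.1 (by simpa using hxX)
                exact this.1
              exact hNdis x hx (hXsub x this)
            rw [h3', h1', h2']

-- ===== VERDICT (by name: the statement is the Claim_ definition above) =====
theorem walk_impacted_nodes_py_spec : Claim_equal_walk_impacted_nodes_py := by
  unfold Claim_equal_walk_impacted_nodes_py
  intro changed_nodes edges _
  unfold Spec_walk_impacted_nodes_py
  unfold walk_impacted_nodes_py walk_impacted_nodes_py_alt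
  have hdd : PySem.List.dedup changed_nodes = PySem.Set.ofList changed_nodes := by simp [pysem]
  rw [hdd]
  have p0 : (PySem.Set.ofList changed_nodes).Nodup := PySem.Set.nodup_ofList changed_nodes
  have q0 : ∀ x ∈ PySem.Set.ofList changed_nodes, x ∈ pvUniverse changed_nodes edges :=
    fun x hx => show x ∈ pvUniverse changed_nodes edges from
      List.mem_append_left _ ((PySem.Set.mem_ofList _ _).1 hx)
  have hn0 : (PySem.Set.ofList changed_nodes).length ≤ (pvUniverse changed_nodes edges).length :=
    pvLen_le p0 q0
  rw [PySem.Set.ofList_eq_self_of_nodup _ (pvLoopB_nodup _ _ _ p0)]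
  refine pvMain edges (pvUniverse changed_nodes edges) (pvBuildAdj edges)
    (fun c x hx => List.mem_append_right _ (pvScan_subset edges c x hx))
    (fun c => pvBuildAdj_getD edges c)
    _ _ (PySem.Set.ofList changed_nodes) changed_nodes 0 p0 q0
    (by omega) (by omega)
    (fun x hx => (PySem.Set.mem_ofList _ _).2 hx)
    (by simp)
    ?_
  simp only [List.take_zero, List.drop_zero]
  rw [List.filter_eq_self.2 (fun x _ => by simp)]
  exact pvOfList_eq_pvNews changed_nodes
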